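-- pv_equiv track=rewrite | github.com/pantheonpy/second | mathModule.py | aryyNotSame
-- ===== SOURCE A (Python) =====
-- def aryyNotSame(X,Y):
--     diffrent=[[X[0],Y[0]]]
--     for i in range(1,len(X)):
--         for dar in diffrent:
--             if(X[i]!=dar[0] or Y[i]!=dar[1]):
--                 diffrent.append([X[i],Y[i]])
--                 break
--     return diffrent
-- ===== SOURCE B (Python) =====
-- def aryyNotSame(X, Y):
--     first = [X[0], Y[0]]
--     k = next((i for i in range(1, len(X)) if [X[i], Y[i]] != first), None)
--     if k is None:
--         return [first]
--     return [first] + [[X[i], Y[i]] for i in range(k, len(X))]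
-- ===== Notes on version B (the rewrite author's own statement) =====
-- stated objective: simpler
-- what changed: Instead of growing a list while rescanning it with an inner loop, B does one find-breakpoint pass (first index whose pair differs from the first pair) and then emits the rest of the pairs directly.
import Mathlib
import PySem

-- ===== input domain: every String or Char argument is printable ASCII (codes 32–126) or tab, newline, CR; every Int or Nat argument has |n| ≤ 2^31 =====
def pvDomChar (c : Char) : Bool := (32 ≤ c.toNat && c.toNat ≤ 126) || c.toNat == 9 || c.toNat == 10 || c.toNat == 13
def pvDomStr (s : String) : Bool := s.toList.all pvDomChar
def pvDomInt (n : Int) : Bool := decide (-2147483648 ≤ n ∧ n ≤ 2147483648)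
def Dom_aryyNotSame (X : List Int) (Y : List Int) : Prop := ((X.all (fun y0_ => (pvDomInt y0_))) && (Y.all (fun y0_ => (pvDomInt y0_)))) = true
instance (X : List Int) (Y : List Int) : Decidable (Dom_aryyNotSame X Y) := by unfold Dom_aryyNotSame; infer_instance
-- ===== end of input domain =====

-- B replaces A's grow-and-rescan loop by a single find-breakpoint pass plus a direct tail emission (simpler decomposition, same cost).


-- ===== PORT A =====
-- inner 'for dar in diffrent: if X[i]!=dar[0] or Y[i]!=dar[1]: diffrent.append([X[i],Y[i]]); break'
-- (the append-then-break means the list observed by the iteration is the original one)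
def pvInnerA (xi yi : Int) : List (List Int) → List (List Int) → List (List Int)
  | [], full => full
  | dar :: rest, full =>
    if (xi != PySem.List.pyGetD dar 0 0) || (yi != PySem.List.pyGetD dar 1 0)
    then full ++ [[xi, yi]]
    else pvInnerA xi yi rest full

def aryyNotSame (X : List Int) (Y : List Int) : List (List Int) :=
  let diffrent := [[PySem.List.pyGetD X 0 0, PySem.List.pyGetD Y 0 0]]
  (PySem.List.pyRange 1 (X.length : Int) 1).foldl
    (fun d i => pvInnerA (PySem.List.pyGetD X i 0) (PySem.List.pyGetD Y i 0) d d) diffrent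

-- ===== PORT B =====
def aryyNotSame_alt (X : List Int) (Y : List Int) : List (List Int) :=
  let first := [PySem.List.pyGetD X 0 0, PySem.List.pyGetD Y 0 0]
  match (PySem.List.pyRange 1 (X.length : Int) 1).find?
      (fun i => [PySem.List.pyGetD X i 0, PySem.List.pyGetD Y i 0] != first) with
  | none => [first]
  | some k => first :: (PySem.List.pyRange k (X.length : Int) 1).map
      (fun i => [PySem.List.pyGetD X i 0, PySem.List.pyGetD Y i 0])

-- ===== PRECONDITION & SPEC =====
-- Python A indexes X[0], Y[0] and Y[i] for every i < len(X): it raises IndexError when X is empty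
-- or Y is shorter than X; exactly those inputs are excluded.
def Pre_aryyNotSame (X : List Int) (Y : List Int) : Prop := X ≠ [] ∧ X.length ≤ Y.length
instance (X : List Int) (Y : List Int) : Decidable (Pre_aryyNotSame X Y) := by unfold Pre_aryyNotSame; infer_instance
def pvWitness_aryyNotSame : List Int × List Int := ([1, 1, 2], [5, 5, 6])

def Spec_aryyNotSame (X : List Int) (Y : List Int) (out : List (List Int)) : Prop := out = aryyNotSame_alt X Y
instance (X : List Int) (Y : List Int) (out : List (List Int)) : Decidable (Spec_aryyNotSame X Y out) := by unfold Spec_aryyNotSame; infer_instance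

-- ===== CLAIM (what is proved, stated in full; the proofs are below) =====
def Claim_equal_aryyNotSame : Prop := ∀ (X : List Int) (Y : List Int), Dom_aryyNotSame X Y → Pre_aryyNotSame X Y → Spec_aryyNotSame X Y (aryyNotSame X Y)

-- ===== LEMMAS AND PROOFS =====

-- the Boolean the inner loop tests on a stored pair [u, v]
theorem pvInnerA_cond (xi yi u v : Int) :
    ((xi != PySem.List.pyGetD [u, v] 0 0) || (yi != PySem.List.pyGetD [u, v] 1 0))
      = ([xi, yi] != [u, v]) := by
  rw [Bool.eq_iff_iff]
  simp only [PySem.List.pyGetD, bne_iff_ne, ne_eq, List.cons.injEq, Bool.or_eq_true]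
  tauto

-- inner loop: some stored pair differs → append
theorem pvInnerA_pos (xi yi : Int) (rest full : List (List Int))
    (h : ∃ u v, [u, v] ∈ rest ∧ [xi, yi] ≠ [u, v])
    (h2 : ∀ q ∈ rest, ∃ u v, q = [u, v]) :
    pvInnerA xi yi rest full = full ++ [[xi, yi]] := by
  induction rest with
  | nil => obtain ⟨u, v, hm, _⟩ := h; simp at hm
  | cons dar rest ih =>
    obtain ⟨u0, v0, hq⟩ := h2 dar (by simp)
    subst hq
    rw [pvInnerA, pvInnerA_cond]
    by_cases hd : [xi, yi] = [u0, v0]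
    · have hb : ([xi, yi] != [u0, v0]) = false := by simp [hd]
      rw [hb]
      simp only [Bool.false_eq_true, if_false]
      apply ih
      · obtain ⟨u, v, hm, hne⟩ := h
        refine ⟨u, v, ?_, hne⟩
        rcases List.mem_cons.mp hm with h' | h'
        · exact absurd (h' ▸ hd) hne
        · exact h'
      · intro q hq; exact h2 q (List.mem_cons_of_mem _ hq)
    · simp [hd]

-- inner loop: the single stored pair equals [xi, yi] → unchanged
theorem pvInnerA_neg (xi yi u v : Int) (full : List (List Int)) (h : [xi, yi] = [u, v]) :
    pvInnerA xi yi [[u, v]] full = full := by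
  rw [pvInnerA, pvInnerA_cond]
  simp [h, pvInnerA]

-- once the state holds two distinct 2-lists, every iteration appends its pair
theorem pvFoldA_append (xf yf : Int → Int) (L : List Int) :
    ∀ (d : List (List Int)),
    (∀ q ∈ d, ∃ u v, q = [u, v]) →
    (∃ p q, p ∈ d ∧ q ∈ d ∧ p ≠ q) →
    L.foldl (fun d i => pvInnerA (xf i) (yf i) d d) d
      = d ++ L.map (fun i => [xf i, yf i]) := by
  induction L with
  | nil => intro d _ _; simp
  | cons i L ih =>
    intro d h2 hpq
    have hstep : pvInnerA (xf i) (yf i) d d = d ++ [[xf i, yf i]] := by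
      apply pvInnerA_pos _ _ _ _ _ h2
      obtain ⟨p, q, hp, hq, hne⟩ := hpq
      obtain ⟨up, vp, hpe⟩ := h2 p hp
      obtain ⟨uq, vq, hqe⟩ := h2 q hq
      subst hpe; subst hqe
      by_cases hc : [xf i, yf i] = [up, vp]
      · exact ⟨uq, vq, hq, fun h => hne (hc.symm.trans h)⟩
      · exact ⟨up, vp, hp, hc⟩
    rw [List.foldl_cons, hstep, ih]
    · simp
    · intro q hq
      rcases List.mem_append.mp hq with h' | h'
      · exact h2 q h'
      · exact ⟨xf i, yf i, by simpa using h'⟩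
    · obtain ⟨p, q, hp, hq, hne⟩ := hpq
      exact ⟨p, q, List.mem_append_left _ hp, List.mem_append_left _ hq, hne⟩

-- main characterisation of A's fold over range(a, n), matching B's find?/map shape
theorem pvFoldA_main (xf yf : Int → Int) (x0 y0 n : Int) :
    ∀ (a : Int),
    (PySem.List.pyRange a n 1).foldl
        (fun d i => pvInnerA (xf i) (yf i) d d) [[x0, y0]]
      = (match (PySem.List.pyRange a n 1).find?
            (fun i => [xf i, yf i] != [x0, y0]) with
        | none => [[x0, y0]]
        | some k => [x0, y0] :: (PySem.List.pyRange k n 1).map (fun i => [xf i, yf i])) := by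
  intro a
  by_cases hlt : a < n
  case neg =>
    rw [PySem.List.pyRange_one_eq_nil (by omega)]
    simp
  case pos =>
    induction h : (n - a).toNat generalizing a with
    | zero => omega
    | succ m ih =>
      rw [PySem.List.pyRange_one_cons hlt]
      by_cases hc : [xf a, yf a] = [x0, y0]
      · rw [List.foldl_cons, pvInnerA_neg _ _ _ _ _ hc, List.find?_cons_of_neg (by simp [hc])]
        by_cases hlt2 : a + 1 < n
        · exact ih (a + 1) hlt2 (by omega)
        · rw [PySem.List.pyRange_one_eq_nil (by omega)]; simp
      · rw [List.find?_cons_of_pos (by simp [hc]), List.foldl_cons]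
        have hstep : pvInnerA (xf a) (yf a) [[x0, y0]] [[x0, y0]]
            = [[x0, y0], [xf a, yf a]] := by
          rw [pvInnerA_pos _ _ _ _ ⟨x0, y0, by simp, hc⟩ (by intro q hq; simp at hq; exact ⟨x0, y0, hq⟩)]
          rfl
        rw [hstep, pvFoldA_append]
        · simp [PySem.List.pyRange_one_cons hlt]
        · intro q hq
          simp at hq
          rcases hq with h' | h'
          · exact ⟨x0, y0, h'⟩
          · exact ⟨xf a, yf a, h'⟩
        · exact ⟨[x0, y0], [xf a, yf a], by simp, by simp, fun h => hc h.symm⟩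

-- ===== VERDICT (by name: the statement is the Claim_ definition above) =====
theorem aryyNotSame_spec : Claim_equal_aryyNotSame := by
  intro X Y _ _
  unfold Spec_aryyNotSame aryyNotSame aryyNotSame_alt
  exact pvFoldA_main (fun i => PySem.List.pyGetD X i 0) (fun i => PySem.List.pyGetD Y i 0)
    (PySem.List.pyGetD X 0 0) (PySem.List.pyGetD Y 0 0) (X.length : Int) 1
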